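-- pv_equiv track=rewrite | github.com/runeharlyk/vla-robotics | scripts/export_libero_demos_h5.py | _split_total_across_suites
-- ===== SOURCE A (Python) =====
-- def _split_total_across_suites(total: int, n_suites: int) -> list[int]:
--     if total < 0:
--         raise ValueError("total must be >= 0")
--     if n_suites <= 0:
--         return []
--     base = total // n_suites
--     rem = total % n_suites
--     return [base + (1 if i < rem else 0) for i in range(n_suites)]
-- ===== SOURCE B (Python) =====
-- def _split_total_across_suites(total: int, n_suites: int) -> list[int]:
--     if total < 0:
--         raise ValueError("total must be >= 0")
--     shares = []
--     remaining = total
--     left = n_suites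
--     while left > 0:
--         share = -(-remaining // left)  # ceiling of remaining / left
--         shares.append(share)
--         remaining -= share
--         left -= 1
--     return shares
-- ===== Notes on version B (the rewrite author's own statement) =====
-- stated objective: alternative
-- what changed: Replaces the closed-form divmod-based per-index comprehension by a greedy sequential loop that at each step takes the ceiling of remaining/left and subtracts it, maintaining mutable (remaining, left) state.
import Mathlib
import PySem

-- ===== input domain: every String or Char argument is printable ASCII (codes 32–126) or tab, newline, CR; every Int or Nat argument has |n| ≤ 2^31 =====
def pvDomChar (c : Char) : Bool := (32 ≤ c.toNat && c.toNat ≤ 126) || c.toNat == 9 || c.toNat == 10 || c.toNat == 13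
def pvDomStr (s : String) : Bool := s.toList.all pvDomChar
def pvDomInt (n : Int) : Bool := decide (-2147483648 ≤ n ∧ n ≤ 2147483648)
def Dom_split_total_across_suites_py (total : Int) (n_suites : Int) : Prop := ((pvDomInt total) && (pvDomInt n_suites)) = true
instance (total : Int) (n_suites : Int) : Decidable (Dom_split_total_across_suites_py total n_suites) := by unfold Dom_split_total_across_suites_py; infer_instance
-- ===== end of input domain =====

-- B distributes greedily: a loop that at each step takes the ceiling of remaining/left and subtracts it, instead of A's divmod-based per-index comprehension; objective: alternative.


-- ===== PORT A =====
def split_total_across_suites_py (total : Int) (n_suites : Int) : List Int :=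
  if n_suites ≤ 0 then []
  else
    let base := PySem.Int.floordiv total n_suites
    let rem := PySem.Int.mod total n_suites
    (PySem.List.pyRange 0 n_suites 1).map (fun i => base + (if i < rem then 1 else 0))

-- ===== PORT B =====
-- the while loop decrements `left` by 1 each turn, so it is transcribed as recursion on left.toNat
def pvBLoop (remaining : Int) : Nat → List Int
  | 0 => []
  | m + 1 =>
    let share := -(PySem.Int.floordiv (-remaining) ((m : Int) + 1))
    share :: pvBLoop (remaining - share) m

def split_total_across_suites_py_alt (total : Int) (n_suites : Int) : List Int :=
  pvBLoop total n_suites.toNat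

-- ===== PRECONDITION & SPEC =====
-- Pre_ excludes total < 0, where A raises ValueError.
def Pre_split_total_across_suites_py (total : Int) (n_suites : Int) : Prop := 0 ≤ total
instance (total : Int) (n_suites : Int) : Decidable (Pre_split_total_across_suites_py total n_suites) := by unfold Pre_split_total_across_suites_py; infer_instance
def pvWitness_split_total_across_suites_py : Int × Int := (7, 3)

def Spec_split_total_across_suites_py (total : Int) (n_suites : Int) (out : List Int) : Prop := out = split_total_across_suites_py_alt total n_suites
instance (total : Int) (n_suites : Int) (out : List Int) : Decidable (Spec_split_total_across_suites_py total n_suites out) := by unfold Spec_split_total_across_suites_py; infer_instance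

-- ===== CLAIM (what is proved, stated in full; the proofs are below) =====
def Claim_equal_split_total_across_suites_py : Prop := ∀ (total : Int) (n_suites : Int), Dom_split_total_across_suites_py total n_suites → Pre_split_total_across_suites_py total n_suites → Spec_split_total_across_suites_py total n_suites (split_total_across_suites_py total n_suites)

-- ===== LEMMAS AND PROOFS =====

-- the ceiling share -((-a) // n) from a representation
lemma pv_ceil (a n q s : Int) (hn : 0 < n) (h : a = n * q + s) (h0 : 0 ≤ s) (hs : s < n) :
    -(PySem.Int.floordiv (-a) n) = q + (if 0 < s then 1 else 0) := by
  rw [PySem.Int.neg_floordiv_neg_eq_iff_of_pos hn]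
  split_ifs with hp
  · constructor <;> nlinarith
  · have : s = 0 := by omega
    subst this
    constructor <;> nlinarith

-- the greedy loop produces the two homogeneous blocks
lemma pvBLoop_blocks : ∀ (m : Nat) (t b r : Int), t = ((m : Int) + 1) * b + r → 0 ≤ r → r < (m : Int) + 1 →
    pvBLoop t (m + 1) = List.replicate r.toNat (b + 1) ++ List.replicate ((m + 1) - r.toNat) b := by
  intro m
  induction m with
  | zero =>
    intro t b r h h0 hr
    have hr0 : r = 0 := by omega
    subst hr0
    have hs : -(PySem.Int.floordiv (-t) ((0 : Int) + 1)) = b + (if (0:Int) < 0 then 1 else 0) :=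
      pv_ceil t 1 b 0 (by norm_num) (by omega) le_rfl (by norm_num)
    simp at hs
    simp [pvBLoop, hs]
  | succ m ih =>
    intro t b r h h0 hr
    have hn : (0 : Int) < (m : Int) + 1 + 1 := by push_cast; omega
    have hs : -(PySem.Int.floordiv (-t) (((m + 1 : Nat) : Int) + 1)) = b + (if 0 < r then 1 else 0) := by
      push_cast
      exact pv_ceil t ((m : Int) + 2) b r (by omega) (by push_cast at h ⊢; linarith) h0 (by push_cast at hr; omega)
    rw [pvBLoop]
    rw [hs]
    by_cases hp : 0 < r
    · simp only [hp, if_pos]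
      have ht' : t - (b + 1) = ((m : Int) + 1) * b + (r - 1) := by push_cast at h ⊢; ring_nf at h ⊢; linarith
      rw [ih (t - (b + 1)) b (r - 1) ht' (by omega) (by push_cast at hr ⊢; omega)]
      have h1 : r.toNat = (r - 1).toNat + 1 := by omega
      rw [h1, List.replicate_succ]
      simp only [List.cons_append]
      have h2 : m + 1 + 1 - ((r - 1).toNat + 1) = m + 1 - (r - 1).toNat := by omega
      rw [h2]
    · have hr0 : r = 0 := by omega
      subst hr0
      simp only [if_neg hp, add_zero]
      have ht' : t - b = ((m : Int) + 1) * b + 0 := by push_cast at h ⊢; ring_nf at h ⊢; linarith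
      rw [ih (t - b) b 0 ht' le_rfl (by push_cast; omega)]
      simp [List.replicate_succ]

-- all indices below r: every element is base+1  (A side)
lemma range_map_all_lt (base : Int) (r : Int) (n : Nat) (h : (n : Int) ≤ r) :
    (List.range n).map (fun k : Nat => base + (if (k : Int) < r then 1 else 0)) =
      List.replicate n (base + 1) := by
  induction n with
  | zero => simp
  | succ m ih =>
    rw [List.range_succ, List.map_append]
    rw [ih (by push_cast at h ⊢; omega)]
    have : ((m : Int) < r) = True := by simp; push_cast at h; omega
    simp [this, List.replicate_succ']

-- A's comprehension produces the two homogeneous blocks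
lemma range_map_blocks (base : Int) (r : Int) (n : Nat) (hr : 0 ≤ r) (h : r ≤ (n : Int)) :
    (List.range n).map (fun k : Nat => base + (if (k : Int) < r then 1 else 0)) =
      List.replicate r.toNat (base + 1) ++ List.replicate (n - r.toNat) base := by
  induction n with
  | zero =>
    have : r = 0 := by omega
    simp [this]
  | succ m ih =>
    by_cases hm : r ≤ (m : Int)
    · rw [List.range_succ, List.map_append, ih hm]
      have : ¬ ((m : Int) < r) := by omega
      simp [this, List.append_assoc]
      rw [← List.replicate_succ']
      congr 1
      omega
    · have hrm : r = (m : Int) + 1 := by omega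
      rw [range_map_all_lt base r (m + 1) (by push_cast; omega)]
      have : r.toNat = m + 1 := by omega
      simp [this]

-- ===== VERDICT (by name: the statement is the Claim_ definition above) =====
theorem split_total_across_suites_py_spec : Claim_equal_split_total_across_suites_py := by
  intro total n_suites _hdom _hpre
  unfold Spec_split_total_across_suites_py split_total_across_suites_py split_total_across_suites_py_alt
  by_cases hn : n_suites ≤ 0
  · have : n_suites.toNat = 0 := by omega
    simp [hn, this, pvBLoop]
  · simp only [hn, if_false]
    have hpos : 0 < n_suites := by omega
    set base := PySem.Int.floordiv total n_suites with hbase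
    set rem := PySem.Int.mod total n_suites with hrem
    have hrb : 0 ≤ rem ∧ rem < n_suites := by
      rw [hrem, PySem.Int.mod_eq_emod_of_pos hpos]
      exact ⟨Int.emod_nonneg _ (by omega), Int.emod_lt_of_pos _ hpos⟩
    -- A side: comprehension = blocks
    rw [PySem.List.pyRange_one, List.map_map]
    have heq : ((fun i => base + (if i < rem then 1 else 0)) ∘ fun k : Nat => (0 : Int) + k)
        = fun k : Nat => base + (if (k : Int) < rem then 1 else 0) := by
      funext k; simp
    rw [heq]
    rw [range_map_blocks base rem (n_suites - 0).toNat hrb.1 (by omega)]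
    -- B side: greedy loop = blocks
    obtain ⟨m, hm⟩ : ∃ m : Nat, n_suites.toNat = m + 1 := ⟨n_suites.toNat - 1, by omega⟩
    have hrep : total = ((m : Int) + 1) * base + rem := by
      have := PySem.Int.floordiv_mul_add_mod total n_suites
      rw [← hbase, ← hrem] at this
      have hcast : ((m : Int) + 1) = n_suites := by omega
      rw [hcast]
      linarith [this]
    rw [hm, pvBLoop_blocks m total base rem hrep hrb.1 (by omega)]
    congr 2
    omega
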